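-- pv_equiv track=rewrite | github.com/amtsu/team22 | users/avlotsmanov/exercise/hw7/hw7.py | print_matrix
-- ===== SOURCE A (Python) =====
-- def print_matrix(matrix):
--     '''
--     Функция, печатающая двумерный список matrix по столбцам
--     '''
--     i = 0
--     j = 0
--     k = 0
--     m = 0
--     mat = []
--     while k <= m:
--         for elem in matrix:
--             m = len(elem)
--             for e in elem:
--                 if i == j:
--                     mat.append(e)
--                 i += 1
--             i = 0
--         j += 1
--         k += 1
--     j = 0
--     return mat
-- ===== SOURCE B (Python) =====
-- def print_matrix(matrix):
--     '''
--     Функция, печатающая двумерный список matrix по столбцам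
--     '''
--     width = max((len(row) for row in matrix), default=0)
--     columns = [[] for _ in range(width)]
--     for row in matrix:
--         for bucket, val in zip(columns, row):
--             bucket.append(val)
--     result = []
--     for col in columns:
--         result.extend(col)
--     return result
-- ===== Notes on version B (the rewrite author's own statement) =====
-- stated objective: faster
-- what changed: A rescans the whole matrix once per column index with manual counters; B computes the column count once (max row length) and makes a single row-major pass distributing each row into per-column buckets, then concatenates the buckets.
-- intended difference: On ragged matrices containing a row more than one element longer than the LAST row, A returns only the columns up to index len(last row)+1 (its loop bound m is the leftover length of the last row, an accident of the implementation), while B returns the full column-major flatten including the longer rows' tail columns, which is what 'print by columns' intends. — e.g. on print_matrix([[1, 2, 3], [4]]): A returns [1, 4, 2], B returns [1, 4, 2, 3]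
import Mathlib
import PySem

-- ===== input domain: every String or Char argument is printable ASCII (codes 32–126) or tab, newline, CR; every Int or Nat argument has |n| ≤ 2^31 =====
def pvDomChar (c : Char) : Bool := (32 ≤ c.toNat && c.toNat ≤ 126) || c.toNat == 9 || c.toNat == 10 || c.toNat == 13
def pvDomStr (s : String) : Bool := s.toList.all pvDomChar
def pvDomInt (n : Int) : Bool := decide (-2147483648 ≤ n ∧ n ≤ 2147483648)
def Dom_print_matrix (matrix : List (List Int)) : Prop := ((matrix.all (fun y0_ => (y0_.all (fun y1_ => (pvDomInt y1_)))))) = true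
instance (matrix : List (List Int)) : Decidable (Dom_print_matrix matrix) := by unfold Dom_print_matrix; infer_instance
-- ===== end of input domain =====

-- B replaces A's repeated whole-matrix scan per column by a single row-major pass into
-- per-column buckets (objective: faster); on ragged matrices with a row more than one
-- element longer than the last row, A accidentally truncates the columns and B returns
-- the full column-major flatten (stated as D_ below).

-- ===== PORT A =====
-- one iteration of A's `while` body: `for elem in matrix: m = len(elem); for e in elem: …; i = 0`
-- state is (i, m, mat); the fuel argument of the loop below only makes the `while` total,
-- it is always large enough for the loop to stop by its own `k <= m` test.
def pvStepA (j : Nat) (st : Nat × Nat × List Int) (elem : List Int) : Nat × Nat × List Int :=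
  let m := elem.length
  let p := elem.foldl (fun (p : Nat × List Int) e =>
      (p.1 + 1, if p.1 = j then p.2 ++ [e] else p.2)) (st.1, st.2.2)
  (0, m, p.2)

def pvLoopA (matrix : List (List Int)) : Nat → Nat → Nat → Nat → Nat → List Int → List Int
  | 0, _, _, _, _, mat => mat
  | fuel + 1, i, j, k, m, mat =>
    if k ≤ m then
      let s := matrix.foldl (pvStepA j) (i, m, mat)
      pvLoopA matrix fuel s.1 (j + 1) (k + 1) s.2.1 s.2.2
    else mat

def print_matrix (matrix : List (List Int)) : List Int :=
  pvLoopA matrix ((matrix.getLast?.map List.length).getD 0 + 2) 0 0 0 0 []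

-- ===== PORT B =====
-- `for bucket, val in zip(columns, row): bucket.append(val)`
def pvAddRow : List (List Int) → List Int → List (List Int)
  | cols, [] => cols
  | [], _ :: _ => []
  | b :: bs, v :: vs => (b ++ [v]) :: pvAddRow bs vs

-- `max((len(row) for row in matrix), default=0)`
def pvWidth (matrix : List (List Int)) : Nat :=
  matrix.foldl (fun w row => max w row.length) 0

def print_matrix_alt (matrix : List (List Int)) : List Int :=
  let width := pvWidth matrix
  let columns := matrix.foldl pvAddRow (List.replicate width [])
  columns.foldl (fun acc col => acc ++ col) []

-- ===== PRECONDITION & SPEC =====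
-- On ragged matrices with a row more than one element longer than the LAST row, A returns
-- only the columns up to index len(last row)+1 (its column bound m is the leftover length
-- of the last row, an accident of the implementation), while B returns the full
-- column-major flatten, which is what flattening by columns intends.
def D_print_matrix (matrix : List (List Int)) : Prop :=
  ∃ row ∈ matrix, ((matrix.getLast?.map List.length).getD 0) + 1 < row.length
instance (matrix : List (List Int)) : Decidable (D_print_matrix matrix) := by
  unfold D_print_matrix; infer_instance

def Spec_print_matrix (matrix : List (List Int)) (out : List Int) : Prop :=
  ¬ D_print_matrix matrix → out = print_matrix_alt matrix
instance (matrix : List (List Int)) (out : List Int) : Decidable (Spec_print_matrix matrix out) := by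
  unfold Spec_print_matrix; infer_instance

def pvDiffWitness_print_matrix : List (List Int) := [[1, 2, 3], [4]]
def pvDiffWitnessOut_print_matrix : (List Int) × (List Int) := ([1, 4, 2], [1, 4, 2, 3])

-- ===== CLAIM (what is proved, stated in full; the proofs are below) =====
def Claim_unchanged_print_matrix : Prop :=
  ∀ (matrix : List (List Int)), Dom_print_matrix matrix →
    Spec_print_matrix matrix (print_matrix matrix)
def Claim_changed_print_matrix : Prop :=
  Dom_print_matrix (pvDiffWitness_print_matrix) ∧ D_print_matrix (pvDiffWitness_print_matrix) ∧
  print_matrix (pvDiffWitness_print_matrix) = pvDiffWitnessOut_print_matrix.1 ∧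
  print_matrix_alt (pvDiffWitness_print_matrix) = pvDiffWitnessOut_print_matrix.2 ∧
  pvDiffWitnessOut_print_matrix.1 ≠ pvDiffWitnessOut_print_matrix.2
def Claim_exact_print_matrix : Prop :=
  ∀ (matrix : List (List Int)), Dom_print_matrix matrix → D_print_matrix matrix →
    print_matrix matrix ≠ print_matrix_alt matrix

-- ===== LEMMAS AND PROOFS =====

-- the j-th column of the matrix, in row order (rows shorter than j+1 contribute nothing)
def pvColJ (rows : List (List Int)) (j : Nat) : List Int :=
  rows.flatMap (fun row => (row[j]?).toList)

-- value A computes: columns 0 .. lastLen (inclusive), concatenated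
def pvCanonA (matrix : List (List Int)) : List Int :=
  (List.range ((matrix.getLast?.map List.length).getD 0 + 1)).flatMap (pvColJ matrix)

-- value B computes: columns 0 .. width-1, concatenated
def pvCanonB (matrix : List (List Int)) : List Int :=
  (List.range (pvWidth matrix)).flatMap (pvColJ matrix)

lemma pvInnerA (j : Nat) : ∀ (elem : List Int) (i : Nat) (mat : List Int),
    elem.foldl (fun (p : Nat × List Int) e =>
        (p.1 + 1, if p.1 = j then p.2 ++ [e] else p.2)) (i, mat)
      = (i + elem.length, mat ++ (if i ≤ j then (elem[j - i]?).toList else [])) := by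
  intro elem
  induction elem with
  | nil =>
    intro i mat
    simp only [List.foldl_nil]
    split_ifs <;> simp
  | cons a as ih =>
    intro i mat
    simp only [List.foldl_cons, ih]
    by_cases h : i = j
    · subst h
      simp
      omega
    · rcases Nat.lt_or_ge i j with hlt | hge
      · have h1 : i ≤ j := le_of_lt hlt
        have h2 : i + 1 ≤ j := hlt
        have h3 : j - i = (j - (i + 1)) + 1 := by omega
        simp [h, h1, h2, h3, List.getElem?_cons_succ]
        omega
      · have h1 : ¬ i ≤ j := by omega
        have h2 : ¬ i + 1 ≤ j := by omega
        simp [h, h1, h2]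
        omega

lemma pvBodyA (j : Nat) : ∀ (rows : List (List Int)) (m : Nat) (mat : List Int),
    rows.foldl (pvStepA j) (0, m, mat)
      = (0, (rows.getLast?.map List.length).getD m, mat ++ pvColJ rows j) := by
  intro rows
  induction rows with
  | nil => intro m mat; simp [pvColJ]
  | cons r rs ih =>
    intro m mat
    have hstep : pvStepA j (0, m, mat) r = (0, r.length, mat ++ (r[j]?).toList) := by
      simp [pvStepA, pvInnerA j r 0 mat]
    rw [List.foldl_cons, hstep, ih]
    have hlast : ((r :: rs).getLast?.map List.length).getD m
        = (rs.getLast?.map List.length).getD r.length := by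
      cases rs with
      | nil => simp
      | cons x xs =>
        rw [List.getLast?_cons_cons]
        obtain ⟨y, hy⟩ := Option.isSome_iff_exists.mp (by simp : ((x :: xs).getLast?).isSome)
        simp [hy]
    rw [hlast]
    simp [pvColJ, List.flatMap_cons, List.append_assoc]

lemma pvLoopA_tail (matrix : List (List Int)) (L : Nat)
    (hL : L = (matrix.getLast?.map List.length).getD 0) :
    ∀ (fuel j : Nat) (mat : List Int), 1 ≤ j → L + 2 - j ≤ fuel →
      pvLoopA matrix fuel 0 j j L mat
        = mat ++ (List.range' j (L + 1 - j)).flatMap (pvColJ matrix) := by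
  intro fuel
  induction fuel with
  | zero =>
    intro j mat h1 hf
    have : L + 1 - j = 0 := by omega
    simp [pvLoopA, this]
  | succ fuel ih =>
    intro j mat h1 hf
    by_cases hj : j ≤ L
    · have hbody := pvBodyA j matrix L mat
      have hm : ((matrix.getLast?.map List.length).getD L) = L := by
        cases h : matrix.getLast? with
        | none => simp
        | some r => simp [h] at hL; simp [hL]
      rw [hm] at hbody
      have : pvLoopA matrix (fuel + 1) 0 j j L mat
          = pvLoopA matrix fuel 0 (j + 1) (j + 1) L (mat ++ pvColJ matrix j) := by
        simp only [pvLoopA, if_pos hj, hbody]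
      rw [this, ih (j + 1) _ (by omega) (by omega)]
      have hr : L + 1 - j = (L - j) + 1 := by omega
      rw [hr, List.range'_succ]
      have : L + 1 - (j + 1) = L - j := by omega
      simp [this, List.append_assoc]
    · have hr : L + 1 - j = 0 := by omega
      simp [pvLoopA, hj, hr]

lemma pvA_eq_canon (matrix : List (List Int)) : print_matrix matrix = pvCanonA matrix := by
  set L := (matrix.getLast?.map List.length).getD 0 with hL
  have hbody := pvBodyA 0 matrix 0 []
  rw [show ((matrix.getLast?.map List.length).getD 0) = L from rfl] at hbody
  have hfirst : print_matrix matrix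
      = pvLoopA matrix (L + 1) 0 1 1 L (pvColJ matrix 0) := by
    show pvLoopA matrix (L + 2) 0 0 0 0 [] = _
    simp only [pvLoopA, if_pos (Nat.le_refl 0), hbody]
    simp
  rw [hfirst, pvLoopA_tail matrix L hL (L + 1) 1 _ (by omega) (by omega)]
  have : List.range (L + 1) = 0 :: List.range' 1 L := by
    rw [List.range_eq_range']
    rfl
  simp [pvCanonA, ← hL, this, List.flatMap_cons]

lemma pvAddRow_getElem? : ∀ (cols : List (List Int)) (row : List Int) (c : Nat),
    (pvAddRow cols row)[c]? = cols[c]?.map (fun b => b ++ (row[c]?).toList) := by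
  intro cols
  induction cols with
  | nil => intro row c; cases row <;> simp [pvAddRow]
  | cons b bs ih =>
    intro row c
    cases row with
    | nil => simp [pvAddRow]
    | cons v vs =>
      cases c with
      | zero => simp [pvAddRow]
      | succ c => simp [pvAddRow, ih]

lemma pvFoldB_getElem? : ∀ (rows cols : List (List Int)) (c : Nat),
    (rows.foldl pvAddRow cols)[c]? = cols[c]?.map (fun b => b ++ pvColJ rows c) := by
  intro rows
  induction rows with
  | nil => intro cols c; simp [pvColJ]
  | cons r rs ih =>
    intro cols c
    rw [List.foldl_cons, ih, pvAddRow_getElem?]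
    cases h : cols[c]? with
    | none => simp
    | some b => simp [pvColJ, List.flatMap_cons, List.append_assoc]

lemma pvAddRow_length : ∀ (cols : List (List Int)) (row : List Int),
    (pvAddRow cols row).length = cols.length := by
  intro cols
  induction cols with
  | nil => intro row; cases row <;> simp [pvAddRow]
  | cons b bs ih =>
    intro row
    cases row with
    | nil => simp [pvAddRow]
    | cons v vs => simp [pvAddRow, ih]

lemma pvFoldB_length : ∀ (rows cols : List (List Int)),
    (rows.foldl pvAddRow cols).length = cols.length := by
  intro rows
  induction rows with
  | nil => intro cols; rfl
  | cons r rs ih => intro cols; rw [List.foldl_cons, ih, pvAddRow_length]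

lemma pvFoldlAppend : ∀ (l : List (List Int)) (acc : List Int),
    l.foldl (fun acc col => acc ++ col) acc = acc ++ l.flatten := by
  intro l
  induction l with
  | nil => intro acc; simp
  | cons a as ih => intro acc; simp [ih, List.append_assoc]

lemma pvFlattenRange : ∀ (l : List (List Int)),
    l.flatten = (List.range l.length).flatMap (fun c => (l[c]?).getD []) := by
  intro l
  induction l with
  | nil => simp
  | cons a as ih =>
    simp only [List.flatten_cons, List.length_cons, List.range_succ_eq_map,
      List.flatMap_cons, List.flatMap_map]
    simp [ih]

lemma pvB_eq_canon (matrix : List (List Int)) : print_matrix_alt matrix = pvCanonB matrix := by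
  have halt : print_matrix_alt matrix
      = (matrix.foldl pvAddRow (List.replicate (pvWidth matrix) [])).flatten := by
    simp [print_matrix_alt, pvFoldlAppend]
  have hlen : (matrix.foldl pvAddRow (List.replicate (pvWidth matrix) ([] : List Int))).length
      = pvWidth matrix := by
    rw [pvFoldB_length]; simp
  rw [halt, pvFlattenRange, hlen, pvCanonB]
  apply List.flatMap_congr
  intro c hc
  rw [List.mem_range] at hc
  rw [pvFoldB_getElem?, List.getElem?_replicate]
  simp [hc]

lemma pvWidth_ge (matrix : List (List Int)) :
    ∀ row ∈ matrix, row.length ≤ pvWidth matrix := by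
  have key : ∀ (l : List (List Int)) (acc : Nat),
      acc ≤ l.foldl (fun w row => max w row.length) acc ∧
      ∀ row ∈ l, row.length ≤ l.foldl (fun w row => max w row.length) acc := by
    intro l
    induction l with
    | nil => intro acc; simp
    | cons r rs ih =>
      intro acc
      obtain ⟨h1, h2⟩ := ih (max acc r.length)
      refine ⟨le_trans (le_max_left _ _) h1, ?_⟩
      intro row hrow
      rcases List.mem_cons.mp hrow with h | h
      · subst h; exact le_trans (le_max_right _ _) h1
      · exact h2 row h
  exact (key matrix 0).2

lemma pvWidth_le (matrix : List (List Int)) (B : Nat)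
    (h : ∀ row ∈ matrix, row.length ≤ B) : pvWidth matrix ≤ B := by
  have key : ∀ (l : List (List Int)) (acc : Nat), acc ≤ B →
      (∀ row ∈ l, row.length ≤ B) →
      l.foldl (fun w row => max w row.length) acc ≤ B := by
    intro l
    induction l with
    | nil => intro acc hacc _; simpa using hacc
    | cons r rs ih =>
      intro acc hacc hall
      exact ih _ (max_le hacc (hall r (List.mem_cons_self ..)))
        (fun row hrow => hall row (List.mem_cons_of_mem _ hrow))
  exact key matrix 0 (Nat.zero_le _) h

lemma pvColJ_empty (matrix : List (List Int)) (j : Nat)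
    (h : pvWidth matrix ≤ j) : pvColJ matrix j = [] := by
  unfold pvColJ
  rw [List.flatMap_eq_nil_iff]
  intro row hrow
  have : row.length ≤ j := le_trans (pvWidth_ge matrix row hrow) h
  simp [List.getElem?_eq_none this]

-- ===== VERDICT (by name: the statements are the Claim_ definitions above) =====
theorem print_matrix_spec : Claim_unchanged_print_matrix := by
  intro matrix _ hnd
  show print_matrix matrix = print_matrix_alt matrix
  rw [pvA_eq_canon, pvB_eq_canon]
  set L := (matrix.getLast?.map List.length).getD 0 with hL
  have hwle : pvWidth matrix ≤ L + 1 := by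
    apply pvWidth_le
    intro row hrow
    by_contra hgt
    exact hnd ⟨row, hrow, by omega⟩
  unfold pvCanonA pvCanonB
  rw [← hL]
  have hsplit : List.range (L + 1)
      = List.range (pvWidth matrix) ++ List.range' (pvWidth matrix) (L + 1 - pvWidth matrix) := by
    have : L + 1 = pvWidth matrix + (L + 1 - pvWidth matrix) := by omega
    rw [this, List.range_add]
    congr 1
    rw [List.range'_eq_map_range]
    simp [List.range_eq_range']
  rw [hsplit, List.flatMap_append]
  have hzero : (List.range' (pvWidth matrix) (L + 1 - pvWidth matrix)).flatMap (pvColJ matrix)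
      = [] := by
    rw [List.flatMap_eq_nil_iff]
    intro j hj
    obtain ⟨i, hi, hij⟩ := List.mem_range'.mp hj
    exact pvColJ_empty matrix j (by omega)
  rw [hzero, List.append_nil]

theorem print_matrix_changed : Claim_changed_print_matrix := by
  unfold Claim_changed_print_matrix; decide

theorem print_matrix_tight : Claim_exact_print_matrix := by
  intro matrix _ hd
  obtain ⟨row, hrow, hlen⟩ := hd
  set L := (matrix.getLast?.map List.length).getD 0 with hL
  rw [pvA_eq_canon, pvB_eq_canon]
  intro heq
  have hlens := congrArg List.length heq
  have hwgt : L + 2 ≤ pvWidth matrix := le_trans (by omega) (pvWidth_ge matrix row hrow)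
  have hcol : 1 ≤ (pvColJ matrix (L + 1)).length := by
    have hv : row[L + 1]? = some (row[L + 1]'(by omega)) :=
      List.getElem?_eq_getElem (by omega)
    have : (row[L + 1]'(by omega)) ∈ pvColJ matrix (L + 1) := by
      unfold pvColJ
      rw [List.mem_flatMap]
      exact ⟨row, hrow, by simp [hv]⟩
    calc 1 ≤ 1 := le_refl 1
    _ ≤ (pvColJ matrix (L + 1)).length := List.length_pos_of_mem this
  -- split B's range at L+1: it begins with A's range then the column L+1
  have hsplit : List.range (pvWidth matrix)
      = List.range (L + 1) ++ List.range' (L + 1) (pvWidth matrix - (L + 1)) := by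
    have : pvWidth matrix = (L + 1) + (pvWidth matrix - (L + 1)) := by omega
    rw [this, List.range_add]
    congr 1
    rw [List.range'_eq_map_range]
    simp [List.range_eq_range']
  have hcons : List.range' (L + 1) (pvWidth matrix - (L + 1))
      = (L + 1) :: List.range' (L + 2) (pvWidth matrix - (L + 2)) := by
    have h1 : pvWidth matrix - (L + 1) = (pvWidth matrix - (L + 2)) + 1 := by omega
    rw [h1, List.range'_succ]
  unfold pvCanonA pvCanonB at hlens
  rw [← hL, hsplit, hcons] at hlens
  simp only [List.flatMap_append, List.flatMap_cons, List.length_append] at hlens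
  omega
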